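-- pv_equiv track=rewrite | github.com/SamyT-code/Python-Assignments | a3_part_2_300184721.py | alienNumbersAgain
-- ===== SOURCE A (Python) =====
-- def alienNumbersAgain(s):
--     '''(str) -> int
--     Preconditions: s is in the set: {T,y,!,a,N,U}
--     This function takes one string parameter s,
--     and returns the integer value represented by s according to alien code
--     Returns the integer value represented by s
--     '''
--
--     counter = 0
--     t = 1024
--     y = 598
--     ex = 121
--     a = 42
--     n = 6
--     u = 1
--
--     for x in s:
--         if x == "T":
--             counter = counter + t
--         elif x == "y":
--             counter = counter + y
--         elif x == "!":
--             counter = counter + ex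
--         elif x == "a":
--             counter = counter + a
--         elif x == "N":
--             counter = counter + n
--         elif x == "U":
--             counter = counter + u
--         else:
--             counter = 0
--
--     return counter
-- ===== SOURCE B (Python) =====
-- def alienNumbersAgain(s):
--     """Decode s in alien code: each symbol adds its value, and an unknown
--     symbol invalidates everything read before it, so only the symbols after
--     the last unknown one count."""
--     VALUES = {'T': 1024, 'y': 598, '!': 121, 'a': 42, 'N': 6, 'U': 1}
--     start = 0
--     for i, x in enumerate(s):
--         if x not in VALUES:
--             start = i + 1
--     return sum(VALUES[x] for x in s[start:])
-- ===== Notes on version B (the rewrite author's own statement) =====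
-- stated objective: alternative
-- what changed: Replaces A's single running-counter loop with an else-reset by a two-phase decomposition: first locate the position after the last unknown symbol, then sum the dict values of that suffix with a comprehension.
import Mathlib
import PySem

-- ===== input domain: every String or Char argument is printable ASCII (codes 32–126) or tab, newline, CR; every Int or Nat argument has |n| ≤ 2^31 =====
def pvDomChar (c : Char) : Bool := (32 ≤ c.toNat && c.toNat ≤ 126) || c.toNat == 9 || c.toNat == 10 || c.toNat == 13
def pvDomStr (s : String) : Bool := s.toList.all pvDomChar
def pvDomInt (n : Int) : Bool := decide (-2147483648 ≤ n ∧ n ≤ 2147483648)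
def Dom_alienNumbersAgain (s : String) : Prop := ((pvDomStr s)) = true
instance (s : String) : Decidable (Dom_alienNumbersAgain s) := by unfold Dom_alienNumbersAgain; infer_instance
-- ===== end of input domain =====

-- B replaces A's running-counter loop with an else-reset by a two-phase decomposition:
-- find the position after the last unknown symbol, then sum the values of that suffix
-- (objective: alternative decomposition, same cost).


-- ===== PORT A =====
-- A's loop: running counter, if/elif chain per character, else resets the counter to 0.
def pvStepA (counter : Int) (x : Char) : Int :=
  if x = 'T' then counter + 1024
  else if x = 'y' then counter + 598
  else if x = '!' then counter + 121
  else if x = 'a' then counter + 42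
  else if x = 'N' then counter + 6
  else if x = 'U' then counter + 1
  else 0

def alienNumbersAgain (s : String) : Int :=
  s.toList.foldl pvStepA 0

-- ===== PORT B =====
-- B's dict of symbol values.
def pvVals : PySem.Dict Char Int :=
  PySem.Dict.ofList [('T', 1024), ('y', 598), ('!', 121), ('a', 42), ('N', 6), ('U', 1)]

-- B phase 1: for i, x in enumerate(s): if x not in VALUES: start = i + 1
def pvStartB (l : List Char) : Int :=
  (PySem.List.enumerate l 0).foldl
    (fun start p => if (PySem.Dict.get? pvVals p.2).isNone then p.1 + 1 else start) 0

-- B phase 2: sum(VALUES[x] for x in s[start:]); every x of the suffix is in the dict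
-- by construction of start, so the total lookup (default 0) is exact there.
def alienNumbersAgain_alt (s : String) : Int :=
  (PySem.List.slice s.toList (some (pvStartB s.toList)) none).foldl
    (fun t x => t + (PySem.Dict.get? pvVals x).getD 0) 0

-- ===== PRECONDITION & SPEC =====
def Spec_alienNumbersAgain (s : String) (out : Int) : Prop := out = alienNumbersAgain_alt s
instance (s : String) (out : Int) : Decidable (Spec_alienNumbersAgain s out) := by unfold Spec_alienNumbersAgain; infer_instance

-- ===== CLAIM (what is proved, stated in full; the proofs are below) =====
def Claim_equal_alienNumbersAgain : Prop := ∀ (s : String), Dom_alienNumbersAgain s → Spec_alienNumbersAgain s (alienNumbersAgain s)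

-- ===== LEMMAS AND PROOFS =====

-- a character is valid iff the dict lookup succeeds
def pvValid (x : Char) : Bool := (PySem.Dict.get? pvVals x).isSome

-- the common reference value: sum of the trailing valid run, computed from the right
def pvTrail : List Char → Int
  | [] => 0
  | x :: r =>
    match PySem.Dict.get? pvVals x with
    | none => 0
    | some v => v + pvTrail r

lemma pvVals_mk : pvVals = PySem.Dict.mk
    [('T', 1024), ('y', 598), ('!', 121), ('a', 42), ('N', 6), ('U', 1)] := rfl

lemma pvVals_none (x : Char) (h1 : ¬x = 'T') (h2 : ¬x = 'y') (h3 : ¬x = '!')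
    (h4 : ¬x = 'a') (h5 : ¬x = 'N') (h6 : ¬x = 'U') :
    PySem.Dict.get? pvVals x = none := by
  rw [pvVals_mk]
  simp [PySem.Dict.get?, h1, h2, h3, h4, h5, h6, Ne.symm]

lemma pvStepA_valid (c : Int) (x : Char) (v : Int)
    (h : PySem.Dict.get? pvVals x = some v) : pvStepA c x = c + v := by
  by_cases h1 : x = 'T'
  · subst h1; rw [show PySem.Dict.get? pvVals 'T' = some 1024 from rfl] at h
    cases h; simp [pvStepA]
  by_cases h2 : x = 'y'
  · subst h2; rw [show PySem.Dict.get? pvVals 'y' = some 598 from rfl] at h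
    cases h; simp [pvStepA]
  by_cases h3 : x = '!'
  · subst h3; rw [show PySem.Dict.get? pvVals '!' = some 121 from rfl] at h
    cases h; simp [pvStepA, h1, h2]
  by_cases h4 : x = 'a'
  · subst h4; rw [show PySem.Dict.get? pvVals 'a' = some 42 from rfl] at h
    cases h; simp [pvStepA, h1, h2, h3]
  by_cases h5 : x = 'N'
  · subst h5; rw [show PySem.Dict.get? pvVals 'N' = some 6 from rfl] at h
    cases h; simp [pvStepA, h1, h2, h3, h4]
  by_cases h6 : x = 'U'
  · subst h6; rw [show PySem.Dict.get? pvVals 'U' = some 1 from rfl] at h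
    cases h; simp [pvStepA, h1, h2, h3, h4, h5]
  · rw [pvVals_none x h1 h2 h3 h4 h5 h6] at h; cases h

lemma pvStepA_invalid (c : Int) (x : Char) (h : PySem.Dict.get? pvVals x = none) :
    pvStepA c x = 0 := by
  by_cases h1 : x = 'T'
  · subst h1; rw [show PySem.Dict.get? pvVals 'T' = some 1024 from rfl] at h; cases h
  by_cases h2 : x = 'y'
  · subst h2; rw [show PySem.Dict.get? pvVals 'y' = some 598 from rfl] at h; cases h
  by_cases h3 : x = '!'
  · subst h3; rw [show PySem.Dict.get? pvVals '!' = some 121 from rfl] at h; cases h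
  by_cases h4 : x = 'a'
  · subst h4; rw [show PySem.Dict.get? pvVals 'a' = some 42 from rfl] at h; cases h
  by_cases h5 : x = 'N'
  · subst h5; rw [show PySem.Dict.get? pvVals 'N' = some 6 from rfl] at h; cases h
  by_cases h6 : x = 'U'
  · subst h6; rw [show PySem.Dict.get? pvVals 'U' = some 1 from rfl] at h; cases h
  · simp [pvStepA, h1, h2, h3, h4, h5, h6]

-- A side: A's fold from any start c equals the trailing-run sum, plus c when every char is valid
lemma pv_keyA (l : List Char) :
    ∀ c : Int, l.foldl pvStepA c =
      if l.all pvValid then c + pvTrail l.reverse else pvTrail l.reverse := by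
  induction l using List.reverseRecOn with
  | nil => intro c; simp [pvTrail]
  | append_singleton l x ih =>
    intro c
    rw [List.foldl_append]
    rw [ih c]
    cases hx : PySem.Dict.get? pvVals x with
    | none =>
      have hv : pvValid x = false := by simp [pvValid, hx]
      simp [List.reverse_append, pvTrail, hx, hv, pvStepA_invalid _ _ hx]
    | some v =>
      have hv : pvValid x = true := by simp [pvValid, hx]
      rw [List.foldl_cons, List.foldl_nil, pvStepA_valid _ _ _ hx]
      by_cases hall : l.all pvValid = true <;>
        simp [List.reverse_append, pvTrail, hx, hv, hall] <;> ring

-- the suffix sum of B's second phase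
def pvSumVals (l : List Char) : Int :=
  l.foldl (fun t x => t + (PySem.Dict.get? pvVals x).getD 0) 0

lemma pvSumVals_append (l : List Char) (x : Char) :
    pvSumVals (l ++ [x]) = pvSumVals l + (PySem.Dict.get? pvVals x).getD 0 := by
  simp [pvSumVals, List.foldl_append]

-- B side: the start index is a Nat ≤ length, and the suffix sum equals the trailing-run sum
lemma pv_keyB (l : List Char) :
    ∃ k : Nat, k ≤ l.length ∧ pvStartB l = (k : Int) ∧
      pvSumVals (l.drop k) = pvTrail l.reverse := by
  induction l using List.reverseRecOn with
  | nil => exact ⟨0, by simp, by simp [pvStartB, PySem.List.enumerate], by simp [pvSumVals, pvTrail]⟩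
  | append_singleton l x ih =>
    obtain ⟨k, hk, hstart, hsum⟩ := ih
    have hen : pvStartB (l ++ [x]) =
        if (PySem.Dict.get? pvVals x).isNone then ((l.length : Int) + 1) else pvStartB l := by
      simp [pvStartB, PySem.List.enumerate_append, List.foldl_append, PySem.List.enumerate]
    cases hx : PySem.Dict.get? pvVals x with
    | none =>
      refine ⟨l.length + 1, by simp, ?_, ?_⟩
      · rw [hen]; simp [hx]
      · have : (l ++ [x]).drop (l.length + 1) = [] := by
          simp [List.drop_append]
        simp [this, pvSumVals, List.reverse_append, pvTrail, hx]
    | some v =>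
      refine ⟨k, by simp; omega, ?_, ?_⟩
      · rw [hen]; simp [hx, hstart]
      · have hd : (l ++ [x]).drop k = l.drop k ++ [x] := by
          rw [List.drop_append_of_le_length hk]
        rw [hd, pvSumVals_append, hsum]
        simp [List.reverse_append, pvTrail, hx]
        ring

-- ===== VERDICT (by name: the statement is the Claim_ definition above) =====
theorem alienNumbersAgain_spec : Claim_equal_alienNumbersAgain := by
  intro s _
  unfold Spec_alienNumbersAgain alienNumbersAgain alienNumbersAgain_alt
  obtain ⟨k, hk, hstart, hsum⟩ := pv_keyB s.toList
  rw [hstart, PySem.List.slice_from_natCast]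
  show List.foldl pvStepA 0 s.toList = pvSumVals (s.toList.drop k)
  rw [hsum, pv_keyA]
  split <;> simp
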